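-- pv_equiv track=rewrite | github.com/pypi-data/pypi-mirror-56 | packages/ngsscriptlibrary/ngsscriptlibrary-1.1.0.tar.gz/ngsscriptlibrary-1.1.0/ngsscriptlibrary/mosaic.py | parse_cigartuple
-- ===== SOURCE A (Python) =====
-- def parse_cigartuple(cigartuple, read_start, chrom):
--     for tup in cigartuple:
--         operation, length = tup
--         if operation == 2:
--             continue
--         elif operation == 1:
--             locus = '{}:{}'.format(chrom, read_start)
--             return locus, length
--         else:
--             read_start += length
-- ===== SOURCE B (Python) =====
-- def parse_cigartuple(cigartuple, read_start, chrom):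
--     idx = next((i for i, (op, _) in enumerate(cigartuple) if op == 1), None)
--     if idx is None:
--         return None
--     offset = sum(length for op, length in cigartuple[:idx] if op != 2)
--     return '{}:{}'.format(chrom, read_start + offset), cigartuple[idx][1]
-- ===== Notes on version B (the rewrite author's own statement) =====
-- stated objective: alternative
-- what changed: Replaces A's single accumulate-and-early-return scan with a locate-then-sum decomposition: first find the index of the first insertion op, then sum the non-deletion lengths of the prefix before it.
import Mathlib
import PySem

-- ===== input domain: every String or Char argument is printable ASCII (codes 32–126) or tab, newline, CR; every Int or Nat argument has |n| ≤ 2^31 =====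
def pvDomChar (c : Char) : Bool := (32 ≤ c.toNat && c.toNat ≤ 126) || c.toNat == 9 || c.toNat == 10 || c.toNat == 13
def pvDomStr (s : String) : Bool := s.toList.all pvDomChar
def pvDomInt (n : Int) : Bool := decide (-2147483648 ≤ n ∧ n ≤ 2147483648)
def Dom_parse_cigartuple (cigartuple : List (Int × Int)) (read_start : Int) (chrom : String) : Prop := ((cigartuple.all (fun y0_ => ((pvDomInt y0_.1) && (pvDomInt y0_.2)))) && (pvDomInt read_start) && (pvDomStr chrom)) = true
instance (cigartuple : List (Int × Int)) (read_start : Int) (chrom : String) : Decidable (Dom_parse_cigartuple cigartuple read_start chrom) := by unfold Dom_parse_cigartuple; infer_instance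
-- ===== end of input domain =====

-- B replaces A's accumulate-and-early-return scan with a locate-then-sum decomposition (alternative, same cost).

-- ===== PORT A =====
-- A's for-loop with early return, as structural recursion over the list with read_start as the loop state.
def parse_cigartuple (cigartuple : List (Int × Int)) (read_start : Int) (chrom : String) : Option (String × Int) :=
  match cigartuple with
  | [] => none
  | (operation, length) :: rest =>
    if operation = 2 then
      parse_cigartuple rest read_start chrom
    else if operation = 1 then
      some (chrom ++ ":" ++ PySem.Int.toStr read_start, length)
    else
      parse_cigartuple rest (read_start + length) chrom

-- ===== PORT B =====
-- Source B: find the index of the first op==1 entry, then sum the op!=2 lengths of the prefix before it.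
def parse_cigartuple_alt (cigartuple : List (Int × Int)) (read_start : Int) (chrom : String) : Option (String × Int) :=
  match cigartuple.findIdx? (fun p => p.1 == 1) with
  | none => none
  | some idx =>
    let offset : Int := (((cigartuple.take idx).filter (fun p => p.1 ≠ 2)).map Prod.snd).sum
    match cigartuple[idx]? with
    | none => none  -- unreachable: findIdx? returns an in-range index
    | some p => some (chrom ++ ":" ++ PySem.Int.toStr (read_start + offset), p.2)

-- ===== PRECONDITION & SPEC =====
def Spec_parse_cigartuple (cigartuple : List (Int × Int)) (read_start : Int) (chrom : String) (out : Option (String × Int)) : Prop := out = parse_cigartuple_alt cigartuple read_start chrom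
instance (cigartuple : List (Int × Int)) (read_start : Int) (chrom : String) (out : Option (String × Int)) : Decidable (Spec_parse_cigartuple cigartuple read_start chrom out) := by unfold Spec_parse_cigartuple; infer_instance

-- ===== CLAIM (what is proved, stated in full; the proofs are below) =====
def Claim_equal_parse_cigartuple : Prop := ∀ (cigartuple : List (Int × Int)) (read_start : Int) (chrom : String), Dom_parse_cigartuple cigartuple read_start chrom → Spec_parse_cigartuple cigartuple read_start chrom (parse_cigartuple cigartuple read_start chrom)

-- ===== LEMMAS AND PROOFS =====

-- B's port satisfies the same recurrence as A's loop.
theorem alt_cons (op len : Int) (rest : List (Int × Int)) (rs : Int) (chrom : String) :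
    parse_cigartuple_alt ((op, len) :: rest) rs chrom =
      (if op = 2 then parse_cigartuple_alt rest rs chrom
       else if op = 1 then some (chrom ++ ":" ++ PySem.Int.toStr rs, len)
       else parse_cigartuple_alt rest (rs + len) chrom) := by
  by_cases h1 : op = 1
  · simp [parse_cigartuple_alt, List.findIdx?_cons, h1]
  · by_cases h2 : op = 2 <;>
      · simp only [parse_cigartuple_alt, List.findIdx?_cons, h1, h2]
        simp only [beq_iff_eq, h1, if_false, if_true]
        cases hf : rest.findIdx? (fun p => p.1 == 1) with
        | none => simp
        | some i =>
          simp [h2, add_assoc, add_comm, add_left_comm]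

theorem equal_aux (cigartuple : List (Int × Int)) :
    ∀ (rs : Int) (chrom : String),
      parse_cigartuple cigartuple rs chrom = parse_cigartuple_alt cigartuple rs chrom := by
  induction cigartuple with
  | nil => intro rs chrom; simp [parse_cigartuple, parse_cigartuple_alt]
  | cons hd tl ih =>
    intro rs chrom
    obtain ⟨op, len⟩ := hd
    rw [alt_cons]
    simp only [parse_cigartuple]
    split_ifs <;> first | rfl | exact ih _ _

-- ===== VERDICT (by name: the statement is the Claim_ definition above) =====
theorem parse_cigartuple_spec : Claim_equal_parse_cigartuple := by
  intro ct rs chrom _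
  exact equal_aux ct rs chrom
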